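-- pv_equiv track=rewrite | github.com/worta/apty | raw/StandardizeData.py | get_places
-- ===== SOURCE A (Python) =====
-- def get_places(ranked_list):
--     places = {i:-1 for i in range(5)}
--     ranking = 1
--     for sub_list in ranked_list.values():
--         for i in range(5):
--             if str(i) in sub_list:
--                 places[i] = ranking
--         if sub_list: #ignores empty list for ranking
--             ranking +=1
--     return places
-- ===== SOURCE B (Python) =====
-- def get_places(ranked_list):
--     # pass 1: tabulate each sub_list with its ranking (rank advances only after non-empty lists)
--     table = []
--     rank = 1
--     for sub_list in ranked_list.values():
--         table.append((sub_list, rank))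
--         if sub_list:
--             rank += 1
--     # pass 2: for each item 0-4, its place is the rank of the last sub_list containing it
--     places = {}
--     for i in range(5):
--         place = -1
--         for sub_list, r in table:
--             if str(i) in sub_list:
--                 place = r
--         places[i] = place
--     return places
-- ===== Notes on version B (the rewrite author's own statement) =====
-- stated objective: alternative
-- what changed: Instead of one interleaved loop updating all five places per sub_list, B first tabulates (sub_list, rank) pairs in one pass, then for each item 0-4 scans the table and takes the rank of the last matching sub_list (equal to A's final overwrite since ranks are monotone).
import Mathlib
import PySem

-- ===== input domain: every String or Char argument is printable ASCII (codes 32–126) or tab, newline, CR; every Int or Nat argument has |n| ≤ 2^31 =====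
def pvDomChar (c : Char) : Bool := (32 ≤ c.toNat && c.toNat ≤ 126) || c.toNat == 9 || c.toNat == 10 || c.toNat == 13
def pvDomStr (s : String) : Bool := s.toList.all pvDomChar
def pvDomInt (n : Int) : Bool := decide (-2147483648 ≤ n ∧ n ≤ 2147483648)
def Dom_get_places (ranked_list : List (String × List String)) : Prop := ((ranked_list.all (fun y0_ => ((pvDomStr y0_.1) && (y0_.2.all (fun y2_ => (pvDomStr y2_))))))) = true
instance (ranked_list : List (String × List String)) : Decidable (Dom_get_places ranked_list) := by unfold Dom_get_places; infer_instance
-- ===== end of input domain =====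

-- B replaces A's interleaved per-sub_list update of all five places by a two-pass
-- tabulation ((sub_list, rank) table, then last-match scan per item); same cost, alternative decomposition.

-- ===== PORT A =====
def get_places (ranked_list : List (String × List String)) : List (Int × Int) :=
  let places : PySem.Dict Int Int :=
    (PySem.List.pyRange 0 5 1).foldl (fun d i => d.insert i (-1)) PySem.Dict.empty
  let st :=
    (PySem.Dict.ofList ranked_list).values.foldl
      (fun (st : PySem.Dict Int Int × Int) sub_list =>
        let places :=
          (PySem.List.pyRange 0 5 1).foldl
            (fun p i => if PySem.Int.toStr i ∈ sub_list then p.insert i st.2 else p) st.1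
        let ranking := if sub_list ≠ [] then st.2 + 1 else st.2
        (places, ranking))
      (places, 1)
  st.1.items

-- ===== PORT B =====
def get_places_alt (ranked_list : List (String × List String)) : List (Int × Int) :=
  -- pass 1: tabulate each sub_list with its ranking
  let st :=
    (PySem.Dict.ofList ranked_list).values.foldl
      (fun (st : List (List String × Int) × Int) sub_list =>
        (st.1 ++ [(sub_list, st.2)], if sub_list ≠ [] then st.2 + 1 else st.2))
      ([], 1)
  -- pass 2: for each item 0-4, the rank of the last matching sub_list (default -1)
  let places :=
    (PySem.List.pyRange 0 5 1).foldl
      (fun (d : PySem.Dict Int Int) i =>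
        d.insert i (st.1.foldl (fun place p => if PySem.Int.toStr i ∈ p.1 then p.2 else place) (-1)))
      PySem.Dict.empty
  places.items

-- ===== PRECONDITION & SPEC =====
def Spec_get_places (ranked_list : List (String × List String)) (out : List (Int × Int)) : Prop := out = get_places_alt ranked_list
instance (ranked_list : List (String × List String)) (out : List (Int × Int)) : Decidable (Spec_get_places ranked_list out) := by unfold Spec_get_places; infer_instance

-- ===== CLAIM (what is proved, stated in full; the proofs are below) =====
def Claim_equal_get_places : Prop := ∀ (ranked_list : List (String × List String)), Dom_get_places ranked_list → Spec_get_places ranked_list (get_places ranked_list)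

-- ===== LEMMAS AND PROOFS =====

-- the five places as a quintuple, and A's per-sub_list update of it
def pvMk5 (w : Int × Int × Int × Int × Int) : List (Int × Int) :=
  [(0, w.1), (1, w.2.1), (2, w.2.2.1), (3, w.2.2.2.1), (4, w.2.2.2.2)]

def pvUpd (w : Int × Int × Int × Int × Int) (s : List String) (r : Int) :
    Int × Int × Int × Int × Int :=
  ((if PySem.Int.toStr 0 ∈ s then r else w.1),
   (if PySem.Int.toStr 1 ∈ s then r else w.2.1),
   (if PySem.Int.toStr 2 ∈ s then r else w.2.2.1),
   (if PySem.Int.toStr 3 ∈ s then r else w.2.2.2.1),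
   (if PySem.Int.toStr 4 ∈ s then r else w.2.2.2.2))

def pvSimA : List (List String) → (Int × Int × Int × Int × Int) → Int →
    Int × Int × Int × Int × Int
  | [], w, _ => w
  | s :: vs, w, r => pvSimA vs (pvUpd w s r) (if s ≠ [] then r + 1 else r)

-- B's table, built front-to-back
def pvTab : List (List String) → Int → List (List String × Int)
  | [], _ => []
  | s :: vs, r => (s, r) :: pvTab vs (if s ≠ [] then r + 1 else r)

-- B's per-item last-match scan
def pvBF (i : Int) (t : List (List String × Int)) (init : Int) : Int :=
  t.foldl (fun place p => if PySem.Int.toStr i ∈ p.1 then p.2 else place) init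

lemma pvRange5 : PySem.List.pyRange 0 5 1 = [0, 1, 2, 3, 4] := by decide

lemma pvInner (s : List String) (r : Int) (w : Int × Int × Int × Int × Int) :
    (PySem.List.pyRange 0 5 1).foldl
      (fun p i => if PySem.Int.toStr i ∈ s then p.insert i r else p)
      (PySem.Dict.mk (pvMk5 w)) = PySem.Dict.mk (pvMk5 (pvUpd w s r)) := by
  rw [pvRange5]
  simp only [List.foldl, pvMk5, pvUpd]
  split_ifs <;> simp [PySem.Dict.insert]

lemma pvOuterA (vals : List (List String)) :
    ∀ (w : Int × Int × Int × Int × Int) (r : Int),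
    (vals.foldl
      (fun (st : PySem.Dict Int Int × Int) sub_list =>
        let places :=
          (PySem.List.pyRange 0 5 1).foldl
            (fun p i => if PySem.Int.toStr i ∈ sub_list then p.insert i st.2 else p) st.1
        let ranking := if sub_list ≠ [] then st.2 + 1 else st.2
        (places, ranking))
      (PySem.Dict.mk (pvMk5 w), r)).1 = PySem.Dict.mk (pvMk5 (pvSimA vals w r)) := by
  induction vals with
  | nil => intro w r; simp [pvSimA]
  | cons s vs ih =>
    intro w r
    simp only [List.foldl, pvSimA]
    rw [pvInner s r w]
    exact ih (pvUpd w s r) (if s ≠ [] then r + 1 else r)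

lemma pvTable (vals : List (List String)) :
    ∀ (acc : List (List String × Int)) (r : Int),
    (vals.foldl
      (fun (st : List (List String × Int) × Int) sub_list =>
        (st.1 ++ [(sub_list, st.2)], if sub_list ≠ [] then st.2 + 1 else st.2))
      (acc, r)).1 = acc ++ pvTab vals r := by
  induction vals with
  | nil => intro acc r; simp [pvTab]
  | cons s vs ih =>
    intro acc r
    simp only [List.foldl, pvTab]
    rw [ih (acc ++ [(s, r)]) (if s ≠ [] then r + 1 else r)]
    simp

lemma pvSimA_eq_bf (vals : List (List String)) :
    ∀ (w : Int × Int × Int × Int × Int) (r : Int),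
    pvSimA vals w r =
      (pvBF 0 (pvTab vals r) w.1, pvBF 1 (pvTab vals r) w.2.1,
       pvBF 2 (pvTab vals r) w.2.2.1, pvBF 3 (pvTab vals r) w.2.2.2.1,
       pvBF 4 (pvTab vals r) w.2.2.2.2) := by
  induction vals with
  | nil => intro w r; simp [pvSimA, pvTab, pvBF]
  | cons s vs ih =>
    intro w r
    simp only [pvSimA, pvTab, pvBF, List.foldl]
    rw [ih (pvUpd w s r) (if s ≠ [] then r + 1 else r)]
    simp [pvBF, pvUpd]

lemma pvBuildB (bf : Int → Int) :
    ((PySem.List.pyRange 0 5 1).foldl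
      (fun (d : PySem.Dict Int Int) i => d.insert i (bf i)) PySem.Dict.empty).items =
    [(0, bf 0), (1, bf 1), (2, bf 2), (3, bf 3), (4, bf 4)] := by
  rw [pvRange5]
  simp [List.foldl, PySem.Dict.insert, PySem.Dict.empty]

-- ===== VERDICT (by name: the statement is the Claim_ definition above) =====
theorem get_places_spec : Claim_equal_get_places := by
  intro ranked_list _
  unfold Spec_get_places get_places get_places_alt
  have h0 : (PySem.List.pyRange 0 5 1).foldl
      (fun (d : PySem.Dict Int Int) i => d.insert i (-1)) PySem.Dict.empty
      = PySem.Dict.mk (pvMk5 (-1, -1, -1, -1, -1)) := by decide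
  simp only [h0]
  rw [pvOuterA, pvTable, pvBuildB, pvSimA_eq_bf]
  simp [pvMk5, pvBF]
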